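-- pv_equiv track=rewrite | github.com/OropezaHugo/algoritmia2homework | griddy/supermarketofferB.py | solve_market_offer
-- ===== SOURCE A (Python) =====
-- def solve_market_offer(products):
--     products = sorted(products, reverse=True)
--     i = 2
--     result = 0
--     while i < len(products):
--         result += products[i]
--         i += 3
--
--     return result
-- ===== SOURCE B (Python) =====
-- def solve_market_offer(products):
--     items = list(products)
--     total = 0
--     while len(items) >= 3:
--         m = 0
--         for _ in range(3):
--             m = max(items)
--             items.remove(m)
--         total += m
--     return total
-- ===== Notes on version B (the rewrite author's own statement) =====
-- stated objective: alternative
-- what changed: B does not sort at all: it repeatedly extracts the maximum (max + remove) three times per round and adds the third extracted value, a selection algorithm in place of A's sort-then-stride over indices 2,5,8,...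
import Mathlib
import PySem

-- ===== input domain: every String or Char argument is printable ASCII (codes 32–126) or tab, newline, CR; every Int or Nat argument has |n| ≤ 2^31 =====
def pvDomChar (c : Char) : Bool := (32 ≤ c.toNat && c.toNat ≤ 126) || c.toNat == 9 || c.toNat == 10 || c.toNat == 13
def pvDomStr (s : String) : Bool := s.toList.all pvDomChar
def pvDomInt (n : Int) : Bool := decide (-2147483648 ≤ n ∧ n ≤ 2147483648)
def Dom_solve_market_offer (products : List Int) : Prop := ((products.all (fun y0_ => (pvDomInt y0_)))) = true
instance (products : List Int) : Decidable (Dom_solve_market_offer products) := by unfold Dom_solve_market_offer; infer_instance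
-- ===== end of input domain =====

-- B replaces A's sort-then-stride by repeated max-extraction (no sort): while ≥ 3 items remain,
-- extract the maximum three times and add the third extracted value (alternative algorithm; not faster).


-- ===== PORT A =====
-- A's while loop: i starts at 2, adds products[i], steps by 3 (i stays ≥ 0, so a Nat index is exact)
def solveMarketLoopA (ps : List Int) (i : Nat) (result : Int) : Int :=
  if h : i < ps.length then solveMarketLoopA ps (i + 3) (result + ps[i]) else result
termination_by ps.length - i

def solve_market_offer (products : List Int) : Int :=
  solveMarketLoopA (PySem.List.sorted products (fun x => x) true) 2 0

-- ===== PORT B =====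
-- one body of B's inner `for`: m = max(items); items.remove(m)  (the .getD guard only makes
-- the removal total: inside the loop items is nonempty, so max? and remove? always succeed)
def solveMarketPop (st : Int × List Int) : Int × List Int :=
  match PySem.List.max? st.2 (fun y => y) with
  | some v => (v, (PySem.List.remove? st.2 v).getD st.2)
  | none => st

-- B's while loop; fuel = initial length is a totality guard (each iteration removes 3 elements)
def solveMarketLoopB : Nat → List Int → Int → Int
  | 0, _, total => total
  | fuel + 1, items, total =>
    if 3 ≤ items.length then
      let st := (PySem.List.pyRange 0 3 1).foldl (fun st _ => solveMarketPop st) (0, items)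
      solveMarketLoopB fuel st.2 (total + st.1)
    else total

def solve_market_offer_alt (products : List Int) : Int :=
  solveMarketLoopB products.length products 0

-- ===== PRECONDITION & SPEC =====
def Spec_solve_market_offer (products : List Int) (out : Int) : Prop := out = solve_market_offer_alt products
instance (products : List Int) (out : Int) : Decidable (Spec_solve_market_offer products out) := by unfold Spec_solve_market_offer; infer_instance

-- ===== CLAIM (what is proved, stated in full; the proofs are below) =====
def Claim_equal_solve_market_offer : Prop := ∀ (products : List Int), Dom_solve_market_offer products → Spec_solve_market_offer products (solve_market_offer products)

-- ===== LEMMAS AND PROOFS =====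

-- the common value: the sum of every third element of a list (positions 2, 5, 8, …)
def tripleThirdSum : List Int → Int
  | _ :: _ :: c :: rest => c + tripleThirdSum rest
  | _ => 0

theorem solveMarketLoopA_shift (a b c : Int) (t : List Int) (i : Nat) (r : Int) :
    solveMarketLoopA (a :: b :: c :: t) (i + 3) r = solveMarketLoopA t i r := by
  fun_induction solveMarketLoopA t i r with
  | case1 i r h ih =>
      rw [solveMarketLoopA]
      simp only [List.length_cons]
      rw [dif_pos (by omega)]
      simpa using ih
  | case2 i r h =>
      rw [solveMarketLoopA]
      simp only [List.length_cons]
      rw [dif_neg (by omega)]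

theorem solveMarketLoopA_eq (s : List Int) (r : Int) :
    solveMarketLoopA s 2 r = r + tripleThirdSum s := by
  induction s using tripleThirdSum.induct generalizing r with
  | case1 a b c rest ih =>
      rw [solveMarketLoopA, dif_pos (by simp)]
      have h2 : (a :: b :: c :: rest)[2] = c := rfl
      rw [h2, solveMarketLoopA_shift, ih, tripleThirdSum]
      ring
  | case2 s h =>
      rcases s with _ | ⟨a, _ | ⟨b, _ | ⟨c, t⟩⟩⟩
      · rw [solveMarketLoopA]; simp [tripleThirdSum]
      · rw [solveMarketLoopA]; simp [tripleThirdSum]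
      · rw [solveMarketLoopA]; simp [tripleThirdSum]
      · exact absurd rfl (h a b c t)

-- one max-extraction step, described through the descending sort of the current items
theorem solveMarketPop_spec (items : List Int) (m a : Int) (t : List Int)
    (h : PySem.List.sorted items (fun x => x) true = a :: t) :
    (solveMarketPop (m, items)).1 = a ∧
    PySem.List.sorted (solveMarketPop (m, items)).2 (fun x => x) true = t ∧
    (solveMarketPop (m, items)).2.length + 1 = items.length := by
  have hperm : (PySem.List.sorted items (fun x => x) true).Perm items := PySem.List.sorted_perm ..
  have hane : items ≠ [] := by
    intro he
    rw [he, (PySem.List.sorted_eq_nil_iff [] (fun x : Int => x) true).mpr rfl] at h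
    exact List.cons_ne_nil a t h.symm
  obtain ⟨v, hv⟩ : ∃ v, PySem.List.max? items (fun y => y) = some v := by
    cases hm : PySem.List.max? items (fun y => y) with
    | none => exact absurd ((PySem.List.max?_eq_none_iff items (fun y => y)).mp hm) hane
    | some v => exact ⟨v, rfl⟩
  have hvmem : v ∈ items := PySem.List.max?_mem hv
  have hva : v = a := by
    have hamem : a ∈ items := hperm.mem_iff.mp (by rw [h]; simp)
    have h1 : a ≤ v := PySem.List.max?_isMax hv a hamem
    have h2 : v ≤ a := PySem.List.key_head_sorted_rev_ge items (fun x => x) h v hvmem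
    omega
  subst hva
  have hrem : PySem.List.remove? items v = some (items.erase v) :=
    PySem.List.remove?_eq_some_erase items v hvmem
  have hpop : solveMarketPop (m, items) = (v, items.erase v) := by
    simp [solveMarketPop, hv, hrem]
  refine ⟨by rw [hpop], ?_, by rw [hpop]; exact List.length_erase_add_one hvmem⟩
  rw [hpop]
  -- sorted (items.erase v) = t : both are descending and permutations of each other
  have hperm2 : (items.erase v).Perm t := by
    have h1 : (items.erase v).Perm ((PySem.List.sorted items (fun x => x) true).erase v) :=
      (hperm.erase v).symm
    rwa [h, List.erase_cons_head] at h1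
  have hsortedt : t.Pairwise (fun x y : Int => (fun z => -z) x ≤ (fun z => -z) y) := by
    have := PySem.List.sorted_pairwise_rev (xs := items) (key := fun x : Int => x)
    rw [h, List.pairwise_cons] at this
    exact this.2.imp (by intro x y hxy; simpa using hxy)
  have hsorted2 : (PySem.List.sorted (items.erase v) (fun x => x) true).Pairwise
      (fun x y : Int => (fun z => -z) x ≤ (fun z => -z) y) :=
    (PySem.List.sorted_pairwise_rev ..).imp (by intro x y hxy; simpa using hxy)
  exact PySem.List.eq_of_perm_of_pairwise_le_of_injective (fun z : Int => -z)
    neg_injective ((PySem.List.sorted_perm ..).trans hperm2) hsorted2 hsortedt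

-- B's loop computes the same every-third sum, through the descending sort of its current items
theorem solveMarketLoopB_eq (fuel : Nat) (items : List Int) (total : Int)
    (hle : items.length ≤ fuel) :
    solveMarketLoopB fuel items total
      = total + tripleThirdSum (PySem.List.sorted items (fun x => x) true) := by
  induction fuel generalizing items total with
  | zero =>
      have : items = [] := List.length_eq_zero_iff.mp (by omega)
      subst this
      simp [solveMarketLoopB, PySem.List.sorted, tripleThirdSum]
  | succ fuel ih =>
      rw [solveMarketLoopB]
      by_cases h3 : 3 ≤ items.length
      · rw [if_pos h3]
        have hlen : (PySem.List.sorted items (fun x => x) true).length = items.length :=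
          PySem.List.length_sorted ..
        obtain ⟨a, b, c, rest, hs⟩ :
            ∃ a b c rest, PySem.List.sorted items (fun x => x) true = a :: b :: c :: rest := by
          rcases hs : PySem.List.sorted items (fun x => x) true with _ | ⟨a, _ | ⟨b, _ | ⟨c, rest⟩⟩⟩ <;>
            first
              | (exfalso; rw [hs] at hlen; simp at hlen; omega)
              | exact ⟨a, b, c, rest, rfl⟩
        rw [show PySem.List.pyRange 0 3 1 = [0, 1, 2] from rfl]
        simp only [List.foldl_cons, List.foldl_nil]
        obtain ⟨h1a, h1s, h1l⟩ := solveMarketPop_spec items 0 a (b :: c :: rest) hs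
        rcases hp1 : solveMarketPop (0, items) with ⟨m1, i1⟩
        rw [hp1] at h1a h1s h1l
        simp only at h1a h1s h1l
        obtain ⟨h2a, h2s, h2l⟩ := solveMarketPop_spec i1 m1 b (c :: rest) h1s
        rcases hp2 : solveMarketPop (m1, i1) with ⟨m2, i2⟩
        rw [hp2] at h2a h2s h2l
        simp only at h2a h2s h2l
        obtain ⟨h3a, h3s, h3l⟩ := solveMarketPop_spec i2 m2 c rest h2s
        rcases hp3 : solveMarketPop (m2, i2) with ⟨m3, i3⟩
        rw [hp3] at h3a h3s h3l
        simp only at h3a h3s h3l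
        subst h1a h2a h3a
        rw [ih i3 (total + m3) (by omega), h3s, hs, tripleThirdSum]
        ring
      · rw [if_neg h3]
        rcases hs : PySem.List.sorted items (fun x => x) true with _ | ⟨a, _ | ⟨b, _ | ⟨c, rest⟩⟩⟩
        · simp [tripleThirdSum]
        · simp [tripleThirdSum]
        · simp [tripleThirdSum]
        · exfalso
          have hlen : (PySem.List.sorted items (fun x => x) true).length = items.length :=
            PySem.List.length_sorted ..
          rw [hs] at hlen; simp at hlen; omega

-- ===== VERDICT (by name: the statement is the Claim_ definition above) =====
theorem solve_market_offer_spec : Claim_equal_solve_market_offer := by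
  intro products _
  unfold Spec_solve_market_offer solve_market_offer solve_market_offer_alt
  rw [solveMarketLoopA_eq, solveMarketLoopB_eq products.length products 0 le_rfl]
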